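-- pv_equiv track=rewrite | github.com/keerthivasan03/JS2025 | april_17.py | reverse_string_preserve_whitespace
-- ===== SOURCE A (Python) =====
-- def reverse_string_preserve_whitespace(s):
--     # Step 1: Collect all non-space characters in reverse order
--     reversed_chars = ''
--     for c in reversed(s):
--         if c != ' ':
--             reversed_chars += c
--
--     # Step 2: Rebuild the string, placing characters or spaces accordingly
--     result = ''
--     index = 0  # index for reversed_chars
--     for c in s:
--         if c == ' ':
--             result += ' '
--         else:
--             result += reversed_chars[index]
--             index += 1
--
--     return result
-- ===== SOURCE B (Python) =====
-- def reverse_string_preserve_whitespace(s):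
--     # Two-pointer in-place swap: reverse the non-space characters while
--     # spaces keep their positions.
--     lst = list(s)
--     i, j = 0, len(lst) - 1
--     while i < j:
--         if lst[i] == ' ':
--             i += 1
--         elif lst[j] == ' ':
--             j -= 1
--         else:
--             lst[i], lst[j] = lst[j], lst[i]
--             i += 1
--             j -= 1
--     return ''.join(lst)
-- ===== Notes on version B (the rewrite author's own statement) =====
-- stated objective: idiomatic
-- what changed: Replaces A's two passes (build a reversed buffer of non-space chars, then rewrite the string consuming it by index) with the classic single two-pointer in-place swap of non-space characters from both ends.
import Mathlib
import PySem

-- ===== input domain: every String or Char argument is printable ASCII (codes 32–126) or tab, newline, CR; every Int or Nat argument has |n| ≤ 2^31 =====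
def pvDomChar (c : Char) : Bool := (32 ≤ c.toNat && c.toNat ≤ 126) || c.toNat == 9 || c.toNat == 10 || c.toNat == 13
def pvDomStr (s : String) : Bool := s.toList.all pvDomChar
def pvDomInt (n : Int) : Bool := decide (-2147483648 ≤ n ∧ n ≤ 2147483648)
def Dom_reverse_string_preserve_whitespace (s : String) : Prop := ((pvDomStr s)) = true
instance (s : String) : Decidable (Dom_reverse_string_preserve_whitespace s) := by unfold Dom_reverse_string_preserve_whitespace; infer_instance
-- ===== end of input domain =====

-- B replaces A's reversed-buffer + rewrite-by-index passes with the classic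
-- two-pointer swap of non-space characters from both ends (idiomatic; same cost).

-- ===== PORT A =====
-- Step 1 loop: build the reversed non-space buffer (string concatenation → list append).
-- Step 2 loop: state (result, index); `reversed_chars[index]` is always in range in A
-- (index counts non-space chars already seen, the buffer holds them all), so the
-- getD default ' ' is never used.
def reverse_string_preserve_whitespace (s : String) : String :=
  let reversed_chars : List Char :=
    s.toList.reverse.foldl (fun acc c => if c ≠ ' ' then acc ++ [c] else acc) []
  let st : List Char × Nat :=
    s.toList.foldl (fun (st : List Char × Nat) c =>
      if c = ' ' then (st.1 ++ [' '], st.2)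
      else (st.1 ++ [reversed_chars.getD st.2 ' '], st.2 + 1)) ([], 0)
  String.ofList st.1

-- ===== PORT B =====
-- Source B's while-loop over (lst, i, j) transcribed as the equivalent both-ends structural
-- recursion on the char list: one recursion step per loop iteration, branches in the
-- same order; the swap lst[i]↔lst[j] becomes placing the last char in front and the
-- first char at the back of the recursively processed middle; the loop's exit i ≥ j
-- is the [] / [c] base cases.
def twoPtrGo : List Char → List Char
  | [] => []
  | [c] => [c]
  | c :: d :: rest =>
    let lst := d :: rest
    let last := lst.getLast (by simp)
    if c = ' ' then ' ' :: twoPtrGo lst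
    else if last = ' ' then twoPtrGo (c :: lst.dropLast) ++ [' ']
    else last :: twoPtrGo lst.dropLast ++ [c]
  termination_by l => l.length
  decreasing_by all_goals simp [List.length_dropLast]

def reverse_string_preserve_whitespace_alt (s : String) : String :=
  String.ofList (twoPtrGo s.toList)

-- ===== PRECONDITION & SPEC =====
def Spec_reverse_string_preserve_whitespace (s : String) (out : String) : Prop := out = reverse_string_preserve_whitespace_alt s
instance (s : String) (out : String) : Decidable (Spec_reverse_string_preserve_whitespace s out) := by unfold Spec_reverse_string_preserve_whitespace; infer_instance

-- ===== CLAIM (what is proved, stated in full; the proofs are below) =====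
def Claim_equal_reverse_string_preserve_whitespace : Prop := ∀ (s : String), Dom_reverse_string_preserve_whitespace s → Spec_reverse_string_preserve_whitespace s (reverse_string_preserve_whitespace s)

-- ===== LEMMAS AND PROOFS =====

-- `place pat cs`: rebuild `pat`, keeping spaces and consuming `cs` for non-space slots.
def place : List Char → List Char → List Char
  | [], _ => []
  | c :: p, cs =>
    if c = ' ' then ' ' :: place p cs
    else match cs with
      | [] => []
      | d :: ds => d :: place p ds

def nonsp (l : List Char) : List Char := l.filter (fun c => c ≠ ' ')

theorem step1_eq_filter (l acc : List Char) :
    l.foldl (fun acc c => if c ≠ ' ' then acc ++ [c] else acc) acc = acc ++ nonsp l := by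
  induction l generalizing acc with
  | nil => simp [nonsp]
  | cons c l ih =>
    by_cases hc : c = ' ' <;> simp [nonsp, List.filter, hc] at * <;> simp [ih]

theorem place_cons_space (p cs : List Char) : place (' ' :: p) cs = ' ' :: place p cs := by
  simp [place]

theorem place_cons_char {c : Char} (hc : c ≠ ' ') (p d ds) :
    place (c :: p) (d :: ds) = d :: place p ds := by
  simp [place, hc]

theorem place_append_space (p cs : List Char) (h : cs.length = (nonsp p).length) :
    place (p ++ [' ']) cs = place p cs ++ [' '] := by
  induction p generalizing cs with
  | nil =>
    have : cs = [] := List.eq_nil_of_length_eq_zero (by simpa [nonsp] using h)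
    subst this; simp [place]
  | cons a p ih =>
    by_cases ha : a = ' '
    · subst ha; simp only [List.cons_append, place_cons_space]
      rw [ih cs (by simpa [nonsp, List.filter] using h)]
    · have hlen : 0 < cs.length := by simp [nonsp, List.filter, ha] at h; omega
      obtain ⟨d, ds, rfl⟩ : ∃ d ds, cs = d :: ds := by
        cases cs with | nil => simp at hlen | cons d ds => exact ⟨d, ds, rfl⟩
      simp only [List.cons_append, place_cons_char ha]
      rw [ih ds (by simp [nonsp, List.filter, ha] at h ⊢; omega)]

theorem place_append_char {e : Char} (he : e ≠ ' ') (p rs : List Char) (c : Char)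
    (h : rs.length = (nonsp p).length) :
    place (p ++ [e]) (rs ++ [c]) = place p rs ++ [c] := by
  induction p generalizing rs with
  | nil =>
    have : rs = [] := List.eq_nil_of_length_eq_zero (by simpa [nonsp] using h)
    subst this; simp [place, he]
  | cons a p ih =>
    by_cases ha : a = ' '
    · subst ha; simp only [List.cons_append, place_cons_space]
      rw [ih rs (by simpa [nonsp, List.filter] using h)]
    · have hlen : 0 < rs.length := by simp [nonsp, List.filter, ha] at h; omega
      obtain ⟨d, ds, rfl⟩ : ∃ d ds, rs = d :: ds := by
        cases rs with | nil => simp at hlen | cons d ds => exact ⟨d, ds, rfl⟩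
      simp only [List.cons_append, place_cons_char ha]
      rw [ih ds (by simp [nonsp, List.filter, ha] at h ⊢; omega)]

-- A's second loop, started at index i, fills with `place` over the unconsumed suffix.
theorem fillA_eq_place (rev : List Char) (l : List Char) :
    ∀ (acc : List Char) (i : Nat), (rev.drop i).length = (nonsp l).length →
    (l.foldl (fun (st : List Char × Nat) c =>
      if c = ' ' then (st.1 ++ [' '], st.2)
      else (st.1 ++ [rev.getD st.2 ' '], st.2 + 1)) (acc, i)).1
      = acc ++ place l (rev.drop i) := by
  induction l with
  | nil => intro acc i h; simp [place]
  | cons c l ih =>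
    intro acc i h
    by_cases hc : c = ' '
    · subst hc
      rw [List.foldl_cons, if_pos rfl,
        ih (acc ++ [' ']) i (by simpa [nonsp, List.filter] using h)]
      simp [place_cons_space]
    · have hi : i < rev.length := by
        simp [nonsp, List.filter, hc, List.length_drop] at h; omega
      have hdrop : rev.drop i = rev[i] :: rev.drop (i + 1) :=
        List.drop_eq_getElem_cons hi
      have hget : rev.getD i ' ' = rev[i] := by simp [List.getD, hi]
      rw [List.foldl_cons, if_neg hc,
        ih (acc ++ [rev.getD i ' ']) (i + 1)
        (by simp [nonsp, List.filter, hc, List.length_drop] at h ⊢; omega)]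
      rw [hdrop, place_cons_char hc, hget]
      simp

theorem reverse_filter (l : List Char) : nonsp l.reverse = (nonsp l).reverse := by
  simp [nonsp, List.filter_reverse]

theorem nonsp_append (p q : List Char) : nonsp (p ++ q) = nonsp p ++ nonsp q := by
  simp [nonsp]

theorem twoPtrGo_eq_place_aux :
    ∀ (n : Nat) (l : List Char), l.length ≤ n → twoPtrGo l = place l (nonsp l).reverse := by
  intro n
  induction n with
  | zero =>
    intro l hl
    have : l = [] := List.eq_nil_of_length_eq_zero (by omega)
    subst this; simp [twoPtrGo, place]
  | succ n ih =>
    intro l hl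
    match l with
    | [] => simp [twoPtrGo, place]
    | [c] => by_cases hc : c = ' ' <;> simp [twoPtrGo, place, nonsp, List.filter, hc]
    | c :: d :: rest =>
      simp only [twoPtrGo]
      have hsplit : (d :: rest : List Char)
          = (d :: rest).dropLast ++ [(d :: rest).getLast (by simp)] :=
        (List.dropLast_append_getLast (by simp)).symm
      by_cases hc : c = ' '
      · rw [if_pos hc, ih (d :: rest) (by simp at hl ⊢; omega)]
        subst hc
        rw [place_cons_space]
        have : nonsp (' ' :: d :: rest) = nonsp (d :: rest) := by simp [nonsp, List.filter]
        rw [this]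
      · rw [if_neg hc]
        by_cases hlast : (d :: rest).getLast (by simp) = ' '
        · rw [if_pos hlast, ih (c :: (d :: rest).dropLast)
            (by simp [List.length_dropLast] at hl ⊢; omega)]
          have hL : c :: d :: rest = (c :: (d :: rest).dropLast) ++ [' '] := by
            conv_lhs => rw [show (d :: rest : List Char)
              = (d :: rest).dropLast ++ [(d :: rest).getLast (by simp)] from hsplit]
            rw [hlast, List.cons_append]
          rw [hL, nonsp_append]
          have hns : nonsp [' '] = [] := by simp [nonsp]
          rw [hns, List.append_nil, place_append_space _ _ (by simp)]
        · rw [if_neg hlast, ih ((d :: rest).dropLast)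
            (by simp [List.length_dropLast] at hl ⊢; omega)]
          have hL : c :: d :: rest
              = c :: ((d :: rest).dropLast ++ [(d :: rest).getLast (by simp)]) :=
            congrArg (c :: ·) hsplit
          conv_rhs => rw [hL]
          have h2 : nonsp (c :: ((d :: rest).dropLast ++ [(d :: rest).getLast (by simp)]))
              = c :: (nonsp (d :: rest).dropLast ++ [(d :: rest).getLast (by simp)]) := by
            simp [nonsp, List.filter, hc, hlast]
          rw [h2, List.reverse_cons, List.reverse_append]
          simp only [List.reverse_singleton, List.singleton_append]
          rw [List.cons_append, List.cons_append, place_cons_char hc, place_append_char hlast _ _ _ (by simp)]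

theorem twoPtrGo_eq_place (l : List Char) : twoPtrGo l = place l (nonsp l).reverse :=
  twoPtrGo_eq_place_aux l.length l (le_refl _)

theorem reverse_string_preserve_whitespace_eq (s : String) :
    reverse_string_preserve_whitespace s = String.ofList (place s.toList (nonsp s.toList).reverse) := by
  simp only [reverse_string_preserve_whitespace]
  have h1 : s.toList.reverse.foldl (fun acc c => if c ≠ ' ' then acc ++ [c] else acc) []
      = (nonsp s.toList).reverse := by
    rw [step1_eq_filter, reverse_filter]; simp
  rw [h1, fillA_eq_place _ _ [] 0 (by simp)]
  simp

-- ===== VERDICT (by name: the statement is the Claim_ definition above) =====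
theorem reverse_string_preserve_whitespace_spec : Claim_equal_reverse_string_preserve_whitespace := by
  intro s _
  show _ = _
  rw [reverse_string_preserve_whitespace_eq]
  unfold reverse_string_preserve_whitespace_alt
  rw [twoPtrGo_eq_place]
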